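-- pv_equiv track=rewrite | github.com/jsaizant/ACER | Catalogue of Requirements Project/catalogue_of_requirements_project.py | remove_contents_and_whereas_2nd_try
-- ===== SOURCE A (Python) =====
-- def remove_contents_and_whereas_2nd_try(text):
--     """
--
--     Args:
--         text:
--
--     Returns:
--         In case Article names are not centered, we use this second method
--     """
--
--     util = 0
--     j = 0
--     contents = False
--
--     # We are going check where the Article 1 'Subject-matter and scope' appear
--     # for the first time (or second in function if there is a table of contents or not)
--
--     while j < len(text) and (util != 2 or contents is False) and (util != 1 or contents is True):
--
--         if "content" in text[j].lower():
--             contents = True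
--
--         if (
--                 "subject matter" in text[j].lower()
--                 or "subject-matter" in text[j].lower()
--                 or "subject, matter" in text[j].lower()
--         ):
--             util += 1
--         j += 1
--
--     return j - 1
-- ===== SOURCE B (Python) =====
-- def remove_contents_and_whereas_2nd_try(text):
--     lows = [t.lower() for t in text]
--     subs = [i for i, t in enumerate(lows)
--             if "subject matter" in t or "subject-matter" in t or "subject, matter" in t]
--     if not subs:
--         return len(text) - 1
--     c = next((i for i, t in enumerate(lows) if "content" in t), None)
--     if c is not None and c <= subs[0]:
--         return subs[1] if len(subs) > 1 else len(text) - 1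
--     return subs[0]
-- ===== Notes on version B (the rewrite author's own statement) =====
-- stated objective: alternative
-- what changed: Replaces the interleaved state-machine loop (util counter + contents flag with a compound exit condition) by an index-location-then-decision structure: lower each line once, collect the subject-matter line indices and the first content line index, then pick subs[0], subs[1] or len(text)-1 by a single comparison c <= subs[0].
import Mathlib
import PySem

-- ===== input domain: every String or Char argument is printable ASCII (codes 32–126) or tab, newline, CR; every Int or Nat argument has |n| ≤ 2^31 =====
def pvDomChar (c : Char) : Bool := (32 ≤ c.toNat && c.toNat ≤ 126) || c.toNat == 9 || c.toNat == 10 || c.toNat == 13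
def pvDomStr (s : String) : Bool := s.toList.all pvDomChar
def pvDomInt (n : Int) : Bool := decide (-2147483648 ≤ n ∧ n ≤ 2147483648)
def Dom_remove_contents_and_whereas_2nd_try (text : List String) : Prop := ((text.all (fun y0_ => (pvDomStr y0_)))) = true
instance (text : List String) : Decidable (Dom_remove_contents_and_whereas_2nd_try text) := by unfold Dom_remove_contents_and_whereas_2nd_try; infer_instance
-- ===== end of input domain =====

-- B replaces A's interleaved state-machine loop by locating the subject-matter indices and the
-- first content index, then deciding by one comparison (alternative decomposition, same O(n) cost).

-- shared substring tests ("…" in line.lower() in A; on the precomputed lowered line in B)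
def pvCont (l : String) : Bool := PySem.Str.isIn "content" l
def pvSubj (l : String) : Bool :=
  PySem.Str.isIn "subject matter" l || PySem.Str.isIn "subject-matter" l || PySem.Str.isIn "subject, matter" l

-- ===== PORT A =====
-- the while loop: `rest` is text[j:], the state (util, j, contents) as in A
def pvLoopA (rest : List String) (util : Int) (j : Int) (contents : Bool) : Int :=
  match rest with
  | [] => j - 1
  | line :: rest' =>
    if (util ≠ 2 ∨ contents = false) ∧ (util ≠ 1 ∨ contents = true) then
      let contents' := if pvCont (PySem.Str.lower line) then true else contents
      let util' := if pvSubj (PySem.Str.lower line) then util + 1 else util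
      pvLoopA rest' util' (j + 1) contents'
    else j - 1

def remove_contents_and_whereas_2nd_try (text : List String) : Int :=
  pvLoopA text 0 0 false

-- ===== PORT B =====
-- [i for i, t in enumerate(lows) if subj(t)] : comprehension as recursion carrying the index
def pvSubsIdx (lows : List String) (i : Int) : List Int :=
  match lows with
  | [] => []
  | h :: t => if pvSubj h then i :: pvSubsIdx t (i + 1) else pvSubsIdx t (i + 1)

-- next((i for i, t in enumerate(lows) if "content" in t), None)
def pvFirstCont (lows : List String) (i : Int) : Option Int :=
  match lows with
  | [] => none
  | h :: t => if pvCont h then some i else pvFirstCont t (i + 1)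

def remove_contents_and_whereas_2nd_try_alt (text : List String) : Int :=
  let lows := text.map PySem.Str.lower
  match pvSubsIdx lows 0 with
  | [] => (text.length : Int) - 1
  | s1 :: rest =>
    match pvFirstCont lows 0 with
    | some c =>
      if c ≤ s1 then
        match rest with
        | s2 :: _ => s2
        | [] => (text.length : Int) - 1
      else s1
    | none => s1

-- ===== PRECONDITION & SPEC =====
def Spec_remove_contents_and_whereas_2nd_try (text : List String) (out : Int) : Prop := out = remove_contents_and_whereas_2nd_try_alt text
instance (text : List String) (out : Int) : Decidable (Spec_remove_contents_and_whereas_2nd_try text out) := by unfold Spec_remove_contents_and_whereas_2nd_try; infer_instance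

-- ===== CLAIM (what is proved, stated in full; the proofs are below) =====
def Claim_equal_remove_contents_and_whereas_2nd_try : Prop := ∀ (text : List String), Dom_remove_contents_and_whereas_2nd_try text → Spec_remove_contents_and_whereas_2nd_try text (remove_contents_and_whereas_2nd_try text)

-- ===== LEMMAS AND PROOFS =====

-- characterisations of A's loop from each reachable state, as simple recursions over the text
def g1 : List String → Int
  | [] => -1
  | h :: t => if pvSubj (PySem.Str.lower h) then 0 else 1 + g1 t

def g2 : List String → Int
  | [] => -1
  | h :: t => if pvSubj (PySem.Str.lower h) then 1 + g1 t else 1 + g2 t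

def g0 : List String → Int
  | [] => -1
  | h :: t =>
    if pvSubj (PySem.Str.lower h) then
      (if pvCont (PySem.Str.lower h) then 1 + g1 t else 0)
    else if pvCont (PySem.Str.lower h) then 1 + g2 t
    else 1 + g0 t

theorem loopA_2 (t : List String) (j : Int) : pvLoopA t 2 j true = j - 1 := by
  cases t <;> simp [pvLoopA]

theorem loopA_1f (t : List String) (j : Int) : pvLoopA t 1 j false = j - 1 := by
  cases t <;> simp [pvLoopA]

theorem loopA_1 (t : List String) (j : Int) : pvLoopA t 1 j true = j + g1 t := by
  induction t generalizing j with
  | nil => simp [pvLoopA, g1]; omega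
  | cons h t ih =>
    by_cases hs : pvSubj (PySem.Str.lower h) = true
    · simp [pvLoopA, g1, hs, loopA_2]
    · simp [pvLoopA, g1, hs, ih]; omega

theorem loopA_0t (t : List String) (j : Int) : pvLoopA t 0 j true = j + g2 t := by
  induction t generalizing j with
  | nil => simp [pvLoopA, g2]; omega
  | cons h t ih =>
    by_cases hs : pvSubj (PySem.Str.lower h) = true
    · simp [pvLoopA, g2, hs, loopA_1]; omega
    · simp [pvLoopA, g2, hs, ih]; omega

theorem loopA_0f (t : List String) (j : Int) : pvLoopA t 0 j false = j + g0 t := by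
  induction t generalizing j with
  | nil => simp [pvLoopA, g0]; omega
  | cons h t ih =>
    by_cases hs : pvSubj (PySem.Str.lower h) = true <;>
      by_cases hc : pvCont (PySem.Str.lower h) = true
    · simp [pvLoopA, g0, hs, hc, loopA_1]; omega
    · simp [pvLoopA, g0, hs, hc, loopA_1f]
    · simp [pvLoopA, g0, hs, hc, loopA_0t]; omega
    · simp [pvLoopA, g0, hs, hc, ih]; omega

-- B-side index-shift and nonnegativity facts
theorem subsIdx_shift (lows : List String) (i : Int) :
    pvSubsIdx lows (i + 1) = (pvSubsIdx lows i).map (· + 1) := by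
  induction lows generalizing i with
  | nil => simp [pvSubsIdx]
  | cons h t ih => by_cases hs : pvSubj h = true <;> simp [pvSubsIdx, hs, ih]

theorem firstCont_shift (lows : List String) (i : Int) :
    pvFirstCont lows (i + 1) = (pvFirstCont lows i).map (· + 1) := by
  induction lows generalizing i with
  | nil => simp [pvFirstCont]
  | cons h t ih => by_cases hc : pvCont h = true <;> simp [pvFirstCont, hc, ih]

theorem subsIdx_le (lows : List String) (i : Int) :
    ∀ x ∈ pvSubsIdx lows i, i ≤ x := by
  induction lows generalizing i with
  | nil => simp [pvSubsIdx]
  | cons h t ih =>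
    intro x hx
    by_cases hs : pvSubj h = true <;> simp [pvSubsIdx, hs] at hx
    · rcases hx with rfl | hx
      · exact le_refl _
      · have := ih (i + 1) x hx; omega
    · have := ih (i + 1) x hx; omega

theorem firstCont_le (lows : List String) (i : Int) (c : Int)
    (h : pvFirstCont lows i = some c) : i ≤ c := by
  induction lows generalizing i with
  | nil => simp [pvFirstCont] at h
  | cons hd t ih =>
    by_cases hc : pvCont hd = true <;> simp [pvFirstCont, hc] at h
    · omega
    · have := ih (i + 1) h; omega

theorem subs_g1 (text : List String) :
    g1 text = (match pvSubsIdx (text.map PySem.Str.lower) 0 with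
               | [] => (text.length : Int) - 1
               | s1 :: _ => s1) := by
  induction text with
  | nil => simp [g1, pvSubsIdx]
  | cons h t ih =>
    have hshift := subsIdx_shift (t.map PySem.Str.lower) 0
    rw [zero_add] at hshift
    by_cases hs : pvSubj (PySem.Str.lower h) = true
    · simp [g1, pvSubsIdx, hs]
    · simp only [g1, hs, List.map_cons, pvSubsIdx, if_neg hs]
      rw [zero_add, hshift, ih]
      rcases pvSubsIdx (t.map PySem.Str.lower) 0 with _ | ⟨a, l⟩ <;> simp <;> ring

theorem subs_g2 (text : List String) :
    g2 text = (match pvSubsIdx (text.map PySem.Str.lower) 0 with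
               | _ :: s2 :: _ => s2
               | _ => (text.length : Int) - 1) := by
  induction text with
  | nil => simp [g2, pvSubsIdx]
  | cons h t ih =>
    have hshift := subsIdx_shift (t.map PySem.Str.lower) 0
    rw [zero_add] at hshift
    by_cases hs : pvSubj (PySem.Str.lower h) = true
    · simp only [g2, if_pos hs, List.map_cons, pvSubsIdx, subs_g1 t]
      rw [zero_add, hshift]
      rcases pvSubsIdx (t.map PySem.Str.lower) 0 with _ | ⟨a, l⟩ <;> simp <;> ring
    · simp only [g2, if_neg hs, List.map_cons, pvSubsIdx, ih]
      rw [zero_add, hshift]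
      rcases pvSubsIdx (t.map PySem.Str.lower) 0 with _ | ⟨a, _ | ⟨b, l⟩⟩ <;> simp <;> ring

theorem alt_eq_g0 (text : List String) :
    remove_contents_and_whereas_2nd_try_alt text = g0 text := by
  induction text with
  | nil => simp [remove_contents_and_whereas_2nd_try_alt, pvSubsIdx, g0]
  | cons h t ih =>
    have hshiftS := subsIdx_shift (t.map PySem.Str.lower) 0
    have hshiftC := firstCont_shift (t.map PySem.Str.lower) 0
    rw [zero_add] at hshiftS hshiftC
    by_cases hs : pvSubj (PySem.Str.lower h) = true <;>
      by_cases hc : pvCont (PySem.Str.lower h) = true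
    · -- head has both: c = 0 ≤ s1 = 0; result = second subject else len-1 = 1 + g1 t
      simp only [remove_contents_and_whereas_2nd_try_alt, List.map_cons, pvSubsIdx, pvFirstCont,
        if_pos hs, if_pos hc, g0, hs, hc, if_true, subs_g1 t]
      rw [zero_add, hshiftS]
      rcases pvSubsIdx (t.map PySem.Str.lower) 0 with _ | ⟨a, l⟩ <;> simp <;> omega
    · -- head subject only: loop stops here; c (if any) is ≥ 1 > s1 = 0
      simp only [remove_contents_and_whereas_2nd_try_alt, List.map_cons, pvSubsIdx, pvFirstCont,
        if_pos hs, if_neg hc, g0, hs, hc, if_true, if_false]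
      rw [zero_add, hshiftC]
      cases hfc : pvFirstCont (t.map PySem.Str.lower) 0 with
      | none => simp
      | some c =>
        have := firstCont_le (t.map PySem.Str.lower) 0 c hfc
        simp; omega
    · -- head content only: c = 0 ≤ any s1; result = second subject else len-1 = 1 + g2 t
      simp only [remove_contents_and_whereas_2nd_try_alt, List.map_cons, pvSubsIdx, pvFirstCont,
        if_neg hs, if_pos hc, g0, hs, hc, if_false, if_true, subs_g2 t]
      rw [zero_add, hshiftS]
      cases hsl : pvSubsIdx (t.map PySem.Str.lower) 0 with
      | nil => simp
      | cons s1 rest =>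
        have hle := subsIdx_le (t.map PySem.Str.lower) 0 s1 (by simp [hsl])
        rcases rest with _ | ⟨s2, l⟩ <;> simp <;> omega
    · -- head matches nothing: everything shifts by one
      simp only [remove_contents_and_whereas_2nd_try_alt, List.map_cons, pvSubsIdx, pvFirstCont,
        g0, hs, hc, Bool.false_eq_true, if_false] at ih ⊢
      rw [zero_add, hshiftS, hshiftC]
      cases hsl : pvSubsIdx (t.map PySem.Str.lower) 0 with
      | nil => simp [hsl] at ih ⊢; omega
      | cons s1 rest =>
        cases hfc : pvFirstCont (t.map PySem.Str.lower) 0 with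
        | none => simp [hsl, hfc] at ih ⊢; omega
        | some c =>
          simp only [hsl, hfc, List.map_cons, Option.map_some] at ih ⊢
          by_cases hcs : c ≤ s1
          · rw [if_pos hcs] at ih
            rw [if_pos (show c + 1 ≤ s1 + 1 by omega)]
            rcases rest with _ | ⟨s2, l⟩ <;> simp at ih ⊢ <;> omega
          · rw [if_neg hcs] at ih
            rw [if_neg (show ¬ c + 1 ≤ s1 + 1 by omega)]
            omega

-- ===== VERDICT (by name: the statement is the Claim_ definition above) =====
theorem remove_contents_and_whereas_2nd_try_spec : Claim_equal_remove_contents_and_whereas_2nd_try := by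
  intro text _
  unfold Spec_remove_contents_and_whereas_2nd_try
  rw [alt_eq_g0]
  show pvLoopA text 0 0 false = g0 text
  rw [loopA_0f]; omega
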